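-- pv_equiv track=rewrite | github.com/songqihao77-code/RareDisease-traindata | tools/run_diagnosis_audit.py | ancestor_map
-- ===== SOURCE A (Python) =====
-- from collections import Counter, defaultdict, deque
--
-- def ancestor_map(parent_map: dict[str, set[str]]) -> dict[str, set[str]]:
--     ancestors: dict[str, set[str]] = {}
--     for node in parent_map:
--         seen: set[str] = set()
--         queue: deque[str] = deque(parent_map.get(node, set()))
--         while queue:
--             parent = queue.popleft()
--             if parent in seen:
--                 continue
--             seen.add(parent)
--             queue.extend(parent_map.get(parent, set()) - seen)
--         ancestors[node] = seen
--     return ancestors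
-- ===== SOURCE B (Python) =====
-- def ancestor_map(parent_map):
--     ancestors = {}
--     for node in parent_map:
--         # Kleene fixpoint iteration: start from the direct parents and repeatedly
--         # expand the WHOLE current set by one parent step until nothing changes.
--         # No queue, no seen-set, no worklist: each round is a global pass.
--         anc = list(dict.fromkeys(parent_map.get(node, ())))
--         while True:
--             nxt = list(dict.fromkeys(anc + [q for p in anc for q in parent_map.get(p, ())]))
--             if nxt == anc:
--                 break
--             anc = nxt
--         ancestors[node] = set(anc)
--     return ancestors
-- ===== Notes on version B (the rewrite author's own statement) =====
-- stated objective: alternative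
-- what changed: A's per-node BFS worklist (deque plus seen-set, one node popped and expanded at a time) is replaced by Kleene fixpoint iteration: starting from the direct parents, the whole current ancestor list is expanded by one parent step in a global pass, repeated until it stops changing; there is no queue, no seen-set and no per-element worklist.
import Mathlib
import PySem

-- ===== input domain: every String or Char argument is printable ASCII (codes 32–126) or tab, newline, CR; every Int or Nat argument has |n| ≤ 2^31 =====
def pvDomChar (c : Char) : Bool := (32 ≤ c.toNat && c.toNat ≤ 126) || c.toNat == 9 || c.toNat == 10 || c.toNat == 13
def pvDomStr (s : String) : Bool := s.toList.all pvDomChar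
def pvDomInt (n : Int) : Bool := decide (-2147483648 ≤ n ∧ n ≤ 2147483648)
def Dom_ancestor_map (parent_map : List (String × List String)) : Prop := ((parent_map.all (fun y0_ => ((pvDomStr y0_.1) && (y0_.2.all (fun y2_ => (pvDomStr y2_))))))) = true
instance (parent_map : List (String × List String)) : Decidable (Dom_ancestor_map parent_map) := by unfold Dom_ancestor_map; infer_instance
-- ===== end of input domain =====

-- B replaces A's per-node BFS worklist (deque + seen-set) by Kleene fixpoint iteration:
-- the whole current ancestor list is expanded by one parent step per global pass until it
-- stops changing; no queue, no seen-set, no worklist. Objective: alternative (not faster).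

-- parent_map.get(k, set()/()) : first-match lookup in the assoc list (the dict)
def pvLook (pm : List (String × List String)) (k : String) : List String :=
  (PySem.Dict.mk pm).getD k []

-- all strings occurring as parents anywhere (used only for termination measures)
def pvU (pm : List (String × List String)) : List String :=
  pm.flatMap (fun kv => kv.2)

theorem pvLook_subset (pm : List (String × List String)) (k : String) :
    ∀ x ∈ pvLook pm k, x ∈ pvU pm := by
  induction pm with
  | nil =>
      intro x hx
      simp [pvLook, PySem.Dict.getD, PySem.Dict.get?] at hx
  | cons kv pm ih =>
      obtain ⟨a, b⟩ := kv
      intro x hx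
      rw [pvLook, PySem.Dict.getD_eq_get?_getD, PySem.Dict.get?_mk_cons] at hx
      by_cases h : a == k
      · rw [if_pos h] at hx
        simp only [Option.getD_some] at hx
        simp only [pvU, List.flatMap_cons, List.mem_append]
        exact Or.inl hx
      · rw [if_neg h] at hx
        have := ih x (by rw [pvLook, PySem.Dict.getD_eq_get?_getD]; exact hx)
        simp only [pvU, List.flatMap_cons, List.mem_append]
        exact Or.inr this

-- first-occurrence filter: drop elements of `seen` and later duplicates
-- (pvDF qs [] = list(dict.fromkeys(qs)); the lemmas below are cited by pvFix's termination)
def pvDF (qs seen : List String) : List String :=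
  match qs with
  | [] => []
  | x :: q => if x ∈ seen then pvDF q seen else x :: pvDF q (seen ++ [x])

theorem pvDF_append (a b : List String) : ∀ s,
    pvDF (a ++ b) s = pvDF a s ++ pvDF b (s ++ pvDF a s) := by
  induction a with
  | nil => intro s; simp [pvDF]
  | cons x a ih =>
      intro s
      by_cases hx : x ∈ s
      · simp only [List.cons_append, pvDF, if_pos hx]
        exact ih s
      · simp only [List.cons_append, pvDF, if_neg hx]
        rw [ih (s ++ [x])]
        simp [List.append_assoc]

theorem pvDF_sub (qs : List String) : ∀ s x, x ∈ pvDF qs s → x ∈ qs := by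
  induction qs with
  | nil => intro s x h; simp [pvDF] at h
  | cons y q ih =>
      intro s x h
      by_cases hy : y ∈ s
      · rw [pvDF, if_pos hy] at h
        exact List.mem_cons_of_mem _ (ih s x h)
      · rw [pvDF, if_neg hy] at h
        rcases List.mem_cons.mp h with h | h
        · exact h ▸ List.mem_cons_self
        · exact List.mem_cons_of_mem _ (ih (s ++ [y]) x h)

theorem pvDF_disj (qs : List String) : ∀ s x, x ∈ pvDF qs s → x ∉ s := by
  induction qs with
  | nil => intro s x h; simp [pvDF] at h
  | cons y q ih =>
      intro s x h
      by_cases hy : y ∈ s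
      · rw [pvDF, if_pos hy] at h
        exact ih s x h
      · rw [pvDF, if_neg hy] at h
        rcases List.mem_cons.mp h with h | h
        · exact h ▸ hy
        · intro hs
          exact ih (s ++ [y]) x h (List.mem_append.mpr (Or.inl hs))

theorem pvDF_nodup (qs : List String) : ∀ s, (pvDF qs s).Nodup := by
  induction qs with
  | nil => intro s; simp [pvDF]
  | cons y q ih =>
      intro s
      by_cases hy : y ∈ s
      · rw [pvDF, if_pos hy]; exact ih s
      · rw [pvDF, if_neg hy]
        refine List.nodup_cons.mpr ⟨?_, ih (s ++ [y])⟩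
        intro hmem
        exact pvDF_disj q (s ++ [y]) y hmem (List.mem_append.mpr (Or.inr List.mem_cons_self))

theorem pvDF_mem_or (qs : List String) : ∀ s x, x ∈ qs → x ∈ s ∨ x ∈ pvDF qs s := by
  induction qs with
  | nil => intro s x h; simp at h
  | cons y q ih =>
      intro s x h
      by_cases hy : y ∈ s
      · rw [pvDF, if_pos hy]
        rcases List.mem_cons.mp h with h | h
        · exact Or.inl (h ▸ hy)
        · exact ih s x h
      · rw [pvDF, if_neg hy]
        rcases List.mem_cons.mp h with h | h
        · exact Or.inr (h ▸ List.mem_cons_self)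
        · rcases ih (s ++ [y]) x h with h' | h'
          · rcases List.mem_append.mp h' with h' | h'
            · exact Or.inl h'
            · simp at h'
              exact Or.inr (h' ▸ List.mem_cons_self)
          · exact Or.inr (List.mem_cons_of_mem _ h')

theorem pvDF_id (l : List String) : ∀ s, l.Nodup → (∀ x ∈ l, x ∉ s) → pvDF l s = l := by
  induction l with
  | nil => intro s _ _; simp [pvDF]
  | cons y q ih =>
      intro s hnd hdisj
      rw [pvDF, if_neg (hdisj y List.mem_cons_self)]
      congr 1
      refine ih (s ++ [y]) (List.nodup_cons.mp hnd).2 ?_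
      intro x hx hmem
      rcases List.mem_append.mp hmem with h | h
      · exact hdisj x (List.mem_cons_of_mem _ hx) h
      · simp at h
        exact (List.nodup_cons.mp hnd).1 (h ▸ hx)

theorem dedup_pvDF (xs : List String) : PySem.List.dedup xs = pvDF xs [] := by
  have aux : ∀ (xs acc : List String),
      xs.foldl (fun s x => PySem.Set.add s x) acc = acc ++ pvDF xs acc := by
    intro xs
    induction xs with
    | nil => intro acc; simp [pvDF]
    | cons y q ih =>
        intro acc
        by_cases hy : y ∈ acc
        · rw [List.foldl_cons, PySem.Set.add_of_mem hy, ih acc, pvDF, if_pos hy]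
        · rw [List.foldl_cons, PySem.Set.add_of_not_mem hy, ih (acc ++ [y]), pvDF, if_neg hy]
          simp [List.append_assoc]
  rw [PySem.List.dedup_eq_ofList, PySem.Set.ofList_eq_foldl]
  simpa using aux xs []

-- ===== PORT A =====
-- the BFS while-loop of A: seen (insertion-ordered set) + FIFO queue, mark-on-pop
def pvALoop (pm : List (String × List String)) (seen queue : List String) : List String :=
  match queue with
  | [] => seen
  | p :: rest =>
    if hp : p ∈ seen then pvALoop pm seen rest
    else
      -- seen.add(parent); queue.extend(parent_map.get(parent, set()) - seen)
      pvALoop pm (PySem.Set.add seen p)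
        (rest ++ PySem.Set.diff (pvLook pm p) (PySem.Set.add seen p))
termination_by ((((pvU pm ++ queue).toFinset \ seen.toFinset).card, queue.length) : Nat ×ₗ Nat)
decreasing_by
  · -- p ∈ seen: same card, shorter queue
    have hcard : ((pvU pm ++ rest).toFinset \ seen.toFinset).card
        = ((pvU pm ++ p :: rest).toFinset \ seen.toFinset).card := by
      congr 1
      ext x
      simp only [Finset.mem_sdiff, List.mem_toFinset, List.mem_append, List.mem_cons]
      constructor
      · rintro ⟨h1, h2⟩; exact ⟨h1.elim Or.inl (fun h => Or.inr (Or.inr h)), h2⟩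
      · rintro ⟨h1, h2⟩
        refine ⟨?_, h2⟩
        rcases h1 with h | h | h
        · exact Or.inl h
        · exact absurd (h ▸ hp) h2
        · exact Or.inr h
    apply Prod.Lex.toLex_lt_toLex.mpr
    dsimp only
    rw [hcard]
    exact Or.inr ⟨rfl, by simp⟩
  · -- p ∉ seen: card strictly drops
    rw [PySem.Set.add_of_not_mem hp]
    apply Prod.Lex.toLex_lt_toLex.mpr
    dsimp only
    left
    apply Finset.card_lt_card
    constructor
    · intro x hx
      simp only [Finset.mem_sdiff, List.mem_toFinset, List.mem_append] at hx ⊢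
      obtain ⟨h1, h2⟩ := hx
      have hxs : x ∉ seen := fun h => h2 (by simp [h])
      refine ⟨?_, hxs⟩
      rcases h1 with h | h | h
      · exact Or.inl h
      · exact Or.inr (List.mem_cons_of_mem _ h)
      · have := (PySem.Set.mem_diff _ _ _).mp h
        exact Or.inl (pvLook_subset pm p x this.1)
    · intro hsub
      have hpold : p ∈ (pvU pm ++ p :: rest).toFinset \ seen.toFinset := by
        simp [List.mem_toFinset, hp]
      have := hsub hpold
      simp [List.mem_toFinset] at this

-- ancestors: dict built key by key; ancestors[node] = seen
def ancestor_map (parent_map : List (String × List String)) : List (String × List String) :=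
  (parent_map.foldl
    (fun anc kv => PySem.Dict.insert anc kv.1 (pvALoop parent_map [] (pvLook parent_map kv.1)))
    PySem.Dict.empty).items

-- ===== PORT B =====
-- B's 'while True' loop: expand the whole current list by one parent step
-- (list(dict.fromkeys(anc + [q for p in anc for q in parents(p)])) = pvDF (…) [] =
-- PySem.List.dedup), stop when nothing changed
def pvExpand (pm : List (String × List String)) (anc : List String) : List String :=
  anc.flatMap (pvLook pm)

def pvFix (pm : List (String × List String)) (anc : List String) : List String :=
  if PySem.List.dedup (anc ++ pvExpand pm anc) = anc then anc
  else pvFix pm (PySem.List.dedup (anc ++ pvExpand pm anc))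
termination_by 2 * (((pvU pm).toFinset \ anc.toFinset).card) + (if anc.Nodup then 0 else 1)
decreasing_by
  rename_i h
  have hd : PySem.List.dedup (anc ++ pvExpand pm anc)
      = pvDF (anc ++ pvExpand pm anc) [] := dedup_pvDF _
  rw [hd] at h ⊢
  have hNnd : (pvDF (anc ++ pvExpand pm anc) []).Nodup := pvDF_nodup _ []
  have hsubA : anc.toFinset ⊆ (pvDF (anc ++ pvExpand pm anc) []).toFinset := by
    intro x hx
    rw [List.mem_toFinset] at hx ⊢
    rcases pvDF_mem_or (anc ++ pvExpand pm anc) [] x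
        (List.mem_append.mpr (Or.inl hx)) with h' | h'
    · simp at h'
    · exact h'
  have hmono : (pvU pm).toFinset \ (pvDF (anc ++ pvExpand pm anc) []).toFinset
      ⊆ (pvU pm).toFinset \ anc.toFinset := fun x hx => by
    rw [Finset.mem_sdiff] at hx ⊢
    exact ⟨hx.1, fun hc => hx.2 (hsubA hc)⟩
  by_cases hnd : anc.Nodup
  · -- anc dup-free: the dedup keeps anc as a prefix; a changed result has a new element
    have hsplit : pvDF (anc ++ pvExpand pm anc) []
        = anc ++ pvDF (pvExpand pm anc) anc := by
      rw [pvDF_append, pvDF_id anc [] hnd (by simp)]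
      simp
    have hF : pvDF (pvExpand pm anc) anc ≠ [] := by
      intro hFnil
      exact h (by rw [hsplit, hFnil, List.append_nil])
    obtain ⟨q, hq⟩ := List.exists_mem_of_ne_nil _ hF
    have hqU : q ∈ pvU pm := by
      have := pvDF_sub _ anc q hq
      rcases List.mem_flatMap.mp (by simpa [pvExpand] using this) with ⟨p, _, hqp⟩
      exact pvLook_subset pm p q hqp
    have hcard : ((pvU pm).toFinset \ (pvDF (anc ++ pvExpand pm anc) []).toFinset).card
        < ((pvU pm).toFinset \ anc.toFinset).card := by
      apply Finset.card_lt_card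
      refine ⟨hmono, fun hsub => ?_⟩
      have hqin : q ∈ (pvU pm).toFinset \ anc.toFinset := by
        rw [Finset.mem_sdiff, List.mem_toFinset, List.mem_toFinset]
        exact ⟨hqU, pvDF_disj _ anc q hq⟩
      have := hsub hqin
      rw [Finset.mem_sdiff, List.mem_toFinset, List.mem_toFinset] at this
      exact this.2 (by rw [hsplit]; exact List.mem_append.mpr (Or.inr hq))
    rw [if_pos hNnd, if_pos hnd]
    omega
  · -- anc has duplicates: the dedup is dup-free, the tiebreaker drops
    have hle : ((pvU pm).toFinset \ (pvDF (anc ++ pvExpand pm anc) []).toFinset).card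
        ≤ ((pvU pm).toFinset \ anc.toFinset).card := Finset.card_le_card hmono
    rw [if_pos hNnd, if_neg hnd]
    omega

def ancestor_map_alt (parent_map : List (String × List String)) : List (String × List String) :=
  (parent_map.foldl
    (fun anc kv => PySem.Dict.insert anc kv.1
      (PySem.Set.ofList (pvFix parent_map (PySem.List.dedup (pvLook parent_map kv.1)))))
    PySem.Dict.empty).items

-- ===== PRECONDITION & SPEC =====
def Spec_ancestor_map (parent_map : List (String × List String)) (out : List (String × List String)) : Prop := out = ancestor_map_alt parent_map
instance (parent_map : List (String × List String)) (out : List (String × List String)) : Decidable (Spec_ancestor_map parent_map out) := by unfold Spec_ancestor_map; infer_instance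

-- ===== CLAIM (what is proved, stated in full; the proofs are below) =====
def Claim_equal_ancestor_map : Prop := ∀ (parent_map : List (String × List String)), Dom_ancestor_map parent_map → Spec_ancestor_map parent_map (ancestor_map parent_map)

-- ===== LEMMAS AND PROOFS =====

theorem pvDF_nilctx (qs : List String) : ∀ s, (∀ x ∈ qs, x ∈ s) → pvDF qs s = [] := by
  induction qs with
  | nil => intro s _; simp [pvDF]
  | cons y q ih =>
      intro s hsub
      rw [pvDF, if_pos (hsub y List.mem_cons_self)]
      exact ih s (fun x hx => hsub x (List.mem_cons_of_mem _ hx))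

-- the inner appends of the reference index-scan (proof device relating A's BFS to pvFix)
def pvNew (L qs : List String) : List String :=
  qs.foldl (fun acc q => if q ∈ L ++ acc then acc else acc ++ [q]) []

theorem pvNew_aux (L qs : List String) :
    ∀ acc q, q ∈ qs.foldl (fun acc q => if q ∈ L ++ acc then acc else acc ++ [q]) acc →
      q ∈ acc ∨ (q ∈ qs ∧ q ∉ L) := by
  induction qs with
  | nil => intro acc q h; simp at h; exact Or.inl h
  | cons x xs ih =>
      intro acc q h
      simp only [List.foldl_cons] at h
      by_cases hx : x ∈ L ++ acc
      · simp only [if_pos hx] at h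
        rcases ih acc q h with h' | h'
        · exact Or.inl h'
        · exact Or.inr ⟨List.mem_cons_of_mem _ h'.1, h'.2⟩
      · simp only [if_neg hx] at h
        rcases ih (acc ++ [x]) q h with h' | h'
        · rcases List.mem_append.mp h' with h'' | h''
          · exact Or.inl h''
          · simp at h''
            subst h''
            exact Or.inr ⟨List.mem_cons_self, fun hL => hx (List.mem_append.mpr (Or.inl hL))⟩
        · exact Or.inr ⟨List.mem_cons_of_mem _ h'.1, h'.2⟩

theorem pvNew_mem (L qs : List String) (q : String) (h : q ∈ pvNew L qs) :
    q ∈ qs ∧ q ∉ L := by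
  rcases pvNew_aux L qs [] q h with h' | h'
  · simp at h'
  · exact h'

-- index-scan BFS (seen = processed prefix, pending = unprocessed suffix): the common
-- intermediate form both pvALoop and pvFix are proved equal to
def pvBLoop (pm : List (String × List String)) (seen pending : List String) : List String :=
  match pending with
  | [] => seen
  | p :: rest =>
    pvBLoop pm (seen ++ [p]) (rest ++ pvNew (seen ++ p :: rest) (pvLook pm p))
termination_by ((((pvU pm).toFinset \ (seen ++ pending).toFinset).card, pending.length) : Nat ×ₗ Nat)
decreasing_by
  · by_cases hn : pvNew (seen ++ p :: rest) (pvLook pm p) = []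
    · apply Prod.Lex.toLex_lt_toLex.mpr
      dsimp only
      right
      refine ⟨?_, by simp [hn]⟩
      rw [hn]
      simp
    · apply Prod.Lex.toLex_lt_toLex.mpr
      dsimp only
      left
      apply Finset.card_lt_card
      obtain ⟨q, hq⟩ := List.exists_mem_of_ne_nil _ hn
      have hq' : q ∈ pvLook pm p ∧ q ∉ seen ++ p :: rest := pvNew_mem _ _ _ hq
      constructor
      · intro x hx
        simp only [Finset.mem_sdiff, List.mem_toFinset, List.mem_append, List.mem_cons] at hx ⊢
        obtain ⟨h1, h2⟩ := hx
        exact ⟨h1, fun h => h2 (by tauto)⟩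
      · intro hsub
        have hqin : q ∈ (pvU pm).toFinset \ (seen ++ p :: rest).toFinset := by
          simp only [Finset.mem_sdiff, List.mem_toFinset]
          exact ⟨pvLook_subset pm p q hq'.1, hq'.2⟩
        have := hsub hqin
        simp only [Finset.mem_sdiff, List.mem_toFinset, List.mem_append] at this
        exact this.2 (Or.inr (Or.inr hq))

theorem pvDF_diff (v : List String) : ∀ s1 s, (∀ x ∈ s1, x ∈ s) →
    pvDF (PySem.Set.diff v s1) s = pvDF v s := by
  induction v with
  | nil => intro s1 s _; simp [PySem.Set.diff, pvDF]
  | cons x v ih =>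
      intro s1 s hsub
      by_cases hx : x ∈ s1
      · rw [show PySem.Set.diff (x :: v) s1 = PySem.Set.diff v s1 by
            simp [PySem.Set.diff, hx]]
        rw [ih s1 s hsub, pvDF, if_pos (hsub x hx)]
      · rw [show PySem.Set.diff (x :: v) s1 = x :: PySem.Set.diff v s1 by
            simp [PySem.Set.diff, hx]]
        by_cases hxs : x ∈ s
        · rw [pvDF, if_pos hxs, pvDF, if_pos hxs]
          exact ih s1 s hsub
        · rw [pvDF, if_neg hxs, pvDF, if_neg hxs, ih s1 (s ++ [x])
            (fun y hy => List.mem_append.mpr (Or.inl (hsub y hy)))]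

theorem pvNew_foldl (L qs : List String) : ∀ acc,
    qs.foldl (fun acc q => if q ∈ L ++ acc then acc else acc ++ [q]) acc
      = acc ++ pvDF qs (L ++ acc) := by
  induction qs with
  | nil => intro acc; simp [pvDF]
  | cons q qs ih =>
      intro acc
      by_cases hq : q ∈ L ++ acc
      · simp only [List.foldl_cons, pvDF, hq]
        exact ih acc
      · simp only [List.foldl_cons, pvDF, if_neg hq]
        rw [ih (acc ++ [q])]
        simp [List.append_assoc]

theorem pvNew_eq (L qs : List String) : pvNew L qs = pvDF qs L := by
  rw [pvNew, pvNew_foldl]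
  simp

theorem pvLoop_eq (pm : List (String × List String)) (seen queue : List String) :
    pvALoop pm seen queue = pvBLoop pm seen (pvDF queue seen) := by
  fun_induction pvALoop pm seen queue with
  | case1 seen => simp [pvDF, pvBLoop]
  | case2 seen p rest hp ih =>
      rw [pvDF, if_pos hp]
      exact ih
  | case3 seen p rest hp ih =>
      rw [PySem.Set.add_of_not_mem hp] at ih ⊢
      rw [pvDF, if_neg hp, pvBLoop]
      rw [ih, pvDF_append, pvDF_diff (pvLook pm p) (seen ++ [p])
            ((seen ++ [p]) ++ pvDF rest (seen ++ [p]))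
            (fun y hy => List.mem_append.mpr (Or.inl hy)),
          pvNew_eq]
      congr 2
      simp

-- shift lemma: processing a whole block P of the pending list appends exactly the
-- one-step-deduplicated parents of P
theorem pvBLoop_shift (pm : List (String × List String)) :
    ∀ (P S Q : List String),
      pvBLoop pm S (P ++ Q)
        = pvBLoop pm (S ++ P) (Q ++ pvDF (P.flatMap (pvLook pm)) (S ++ P ++ Q)) := by
  intro P
  induction P with
  | nil => intro S Q; simp [pvDF]
  | cons p P' ih =>
      intro S Q
      rw [List.cons_append, pvBLoop, pvNew_eq]
      have step := ih (S ++ [p]) (Q ++ pvDF (pvLook pm p) (S ++ p :: (P' ++ Q)))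
      rw [show P' ++ Q ++ pvDF (pvLook pm p) (S ++ p :: (P' ++ Q))
            = P' ++ (Q ++ pvDF (pvLook pm p) (S ++ p :: (P' ++ Q))) by
          simp [List.append_assoc]]
      rw [step]
      rw [List.flatMap_cons, pvDF_append]
      congr 1
      · simp
      · simp [List.append_assoc]

-- the BFS index-scan equals the round-by-round fixpoint iteration
theorem pvFix_eq (pm : List (String × List String)) :
    ∀ (n : Nat) (S P : List String),
      ((pvU pm).toFinset \ (S ++ P).toFinset).card = n →
      (S ++ P).Nodup →
      (∀ x ∈ S.flatMap (pvLook pm), x ∈ S ++ P) →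
      pvBLoop pm S P = pvFix pm (S ++ P) := by
  intro n
  induction n using Nat.strong_induction_on with
  | _ n ih =>
    intro S P hn hnd hcl
    have hround := pvBLoop_shift pm P S []
    simp only [List.append_nil, List.nil_append] at hround
    set F := pvDF (P.flatMap (pvLook pm)) (S ++ P) with hFdef
    -- compute the next iterate of pvFix
    have hnxt : PySem.List.dedup ((S ++ P) ++ pvExpand pm (S ++ P)) = (S ++ P) ++ F := by
      rw [dedup_pvDF, pvDF_append, pvDF_id (S ++ P) [] hnd (by simp)]
      congr 1
      rw [show pvExpand pm (S ++ P) = S.flatMap (pvLook pm) ++ P.flatMap (pvLook pm) by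
            simp [pvExpand]]
      rw [pvDF_append, pvDF_nilctx (S.flatMap (pvLook pm))
            ([] ++ (S ++ P)) (by simpa using hcl)]
      simp only [List.nil_append, List.append_nil]
      exact hFdef.symm
    by_cases hF : F = []
    · rw [hround, hF, pvBLoop]
      rw [pvFix.eq_def, hnxt, hF, List.append_nil, if_pos rfl]
    · have hFprops : F.Nodup ∧ (∀ x ∈ F, x ∉ S ++ P) ∧ (∀ x ∈ F, x ∈ pvU pm) := by
        refine ⟨pvDF_nodup _ _, fun x hx => pvDF_disj _ _ x hx, fun x hx => ?_⟩
        rcases List.mem_flatMap.mp (pvDF_sub _ _ x hx) with ⟨p, _, hqp⟩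
        exact pvLook_subset pm p x hqp
      have hnd' : ((S ++ P) ++ F).Nodup := by
        rw [List.nodup_append]
        exact ⟨hnd, hFprops.1, fun a ha b hb hab => hFprops.2.1 b hb (hab ▸ ha)⟩
      have hcl' : ∀ x ∈ (S ++ P).flatMap (pvLook pm), x ∈ (S ++ P) ++ F := by
        intro x hx
        rw [List.flatMap_append, List.mem_append] at hx
        rcases hx with hx | hx
        · exact List.mem_append.mpr (Or.inl (hcl x hx))
        · rcases pvDF_mem_or _ (S ++ P) x hx with h' | h'
          · exact List.mem_append.mpr (Or.inl h')
          · exact List.mem_append.mpr (Or.inr h')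
      have hlt : ((pvU pm).toFinset \ ((S ++ P) ++ F).toFinset).card < n := by
        rw [← hn]
        apply Finset.card_lt_card
        constructor
        · intro x hx
          rw [Finset.mem_sdiff] at hx ⊢
          refine ⟨hx.1, fun hc => hx.2 ?_⟩
          rw [List.mem_toFinset] at hc ⊢
          exact List.mem_append.mpr (Or.inl hc)
        · intro hsub
          obtain ⟨q, hq⟩ := List.exists_mem_of_ne_nil _ hF
          have hqin : q ∈ (pvU pm).toFinset \ (S ++ P).toFinset := by
            rw [Finset.mem_sdiff, List.mem_toFinset, List.mem_toFinset]
            exact ⟨hFprops.2.2 q hq, hFprops.2.1 q hq⟩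
          have := hsub hqin
          rw [Finset.mem_sdiff, List.mem_toFinset, List.mem_toFinset] at this
          exact this.2 (List.mem_append.mpr (Or.inr hq))
      have := ih _ hlt (S ++ P) F rfl hnd' hcl'
      rw [hround, this]
      conv_rhs => rw [pvFix.eq_def]
      have hne : (S ++ P) ++ F ≠ S ++ P := by
        intro hcontra
        have := congrArg List.length hcontra
        simp at this
        exact hF this
      rw [hnxt, if_neg hne]

theorem pvFix_nodup (pm : List (String × List String)) (anc : List String) :
    (pvFix pm anc).Nodup := by
  fun_induction pvFix pm anc with
  | case1 anc h =>
      rw [← h, dedup_pvDF]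
      exact pvDF_nodup _ []
  | case2 anc h ih => exact ih

theorem ofList_id (l : List String) (h : l.Nodup) : PySem.Set.ofList l = l := by
  rw [← PySem.List.dedup_eq_ofList, dedup_pvDF]
  exact pvDF_id l [] h (by simp)

theorem pvKey_eq (pm : List (String × List String)) (k : String) :
    pvALoop pm [] (pvLook pm k)
      = PySem.Set.ofList (pvFix pm (PySem.List.dedup (pvLook pm k))) := by
  have h0 : PySem.List.dedup (pvLook pm k) = pvDF (pvLook pm k) [] := dedup_pvDF _
  have hmain := pvFix_eq pm (((pvU pm).toFinset \ (([] : List String) ++ pvDF (pvLook pm k) []).toFinset).card)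
      [] (pvDF (pvLook pm k) []) rfl (by simpa using pvDF_nodup (pvLook pm k) []) (by simp)
  rw [pvLoop_eq, hmain]
  rw [List.nil_append, ← h0, ofList_id _ (pvFix_nodup pm _)]

theorem pvOuter_eq (pm : List (String × List String)) :
    ∀ (l : List (String × List String)) (d : PySem.Dict String (List String)),
      l.foldl (fun anc kv => PySem.Dict.insert anc kv.1 (pvALoop pm [] (pvLook pm kv.1))) d
        = l.foldl (fun anc kv => PySem.Dict.insert anc kv.1
            (PySem.Set.ofList (pvFix pm (PySem.List.dedup (pvLook pm kv.1))))) d := by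
  intro l
  induction l with
  | nil => intro d; rfl
  | cons kv l ih =>
      intro d
      simp only [List.foldl_cons]
      rw [pvKey_eq, ih]

-- ===== VERDICT (by name: the statement is the Claim_ definition above) =====
theorem ancestor_map_spec : Claim_equal_ancestor_map := by
  intro pm _
  unfold Spec_ancestor_map ancestor_map ancestor_map_alt
  rw [pvOuter_eq]
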